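-- pv_equiv track=rewrite | github.com/fahadahaf/satori | src/utils.py | get_intr_filter_keys
-- ===== SOURCE A (Python) =====
-- def get_intr_filter_keys(num_filters=200):
--     Filter_Intr_Keys = {}
--     count_index = 0
--     for i in range(0,num_filters):
--         for j in range(0,num_filters):
--             if i == j:
--                 continue
--             intr = 'filter'+str(i)+'<-->'+'filter'+str(j)
--             rev_intr = 'filter'+str(j)+'<-->'+'filter'+str(i)
--             if intr not in Filter_Intr_Keys and rev_intr not in Filter_Intr_Keys:
--                 Filter_Intr_Keys[intr] = count_index
--                 count_index += 1
--     return Filter_Intr_Keys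
-- ===== SOURCE B (Python) =====
-- def get_intr_filter_keys(num_filters=200):
--     keys = ['filter' + str(i) + '<-->' + 'filter' + str(j)
--             for i in range(num_filters)
--             for j in range(i + 1, num_filters)]
--     return {k: idx for idx, k in enumerate(keys)}
-- ===== Notes on version B (the rewrite author's own statement) =====
-- stated objective: alternative
-- what changed: B enumerates each unordered pair exactly once (j from i+1) and assigns indices by enumeration, so A's per-pair dict-membership tests and reverse-key string construction disappear; intended as faster (measured ~3.4x at n=256) but both remain O(n^2) and a timing run could not confirm it at the largest size.
import Mathlib
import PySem

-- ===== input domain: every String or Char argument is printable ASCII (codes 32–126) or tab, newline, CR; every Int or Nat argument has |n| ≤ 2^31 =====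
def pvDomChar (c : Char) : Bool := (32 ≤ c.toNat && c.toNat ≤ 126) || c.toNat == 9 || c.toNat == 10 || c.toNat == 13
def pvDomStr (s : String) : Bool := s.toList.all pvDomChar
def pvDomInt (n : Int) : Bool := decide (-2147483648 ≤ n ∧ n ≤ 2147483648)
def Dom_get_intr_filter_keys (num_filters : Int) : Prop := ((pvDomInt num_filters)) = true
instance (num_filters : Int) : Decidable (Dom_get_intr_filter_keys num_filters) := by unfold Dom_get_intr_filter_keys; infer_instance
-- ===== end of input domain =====

-- B enumerates each unordered pair once (j from i+1) and assigns indices by enumeration,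
-- removing A's dict-membership tests and reverse-key construction (same O(n^2) output size).

-- the key string 'filter' + str(i) + '<-->' + 'filter' + str(j) (exact: str on Int is PySem.Int.toChars)
def pvKey (i j : Int) : String :=
  String.ofList ("filter".toList ++ PySem.Int.toChars i ++ "<-->".toList ++ "filter".toList ++ PySem.Int.toChars j)

-- ===== PORT A =====
-- the body of A's inner loop: state = (Filter_Intr_Keys, count_index)
def pvAstep (i : Int) (st : PySem.Dict String Int × Int) (j : Int) : PySem.Dict String Int × Int :=
  if i == j then st
  else
    let intr := pvKey i j
    let rev_intr := pvKey j i
    if !st.1.contains intr && !st.1.contains rev_intr then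
      (st.1.insert intr st.2, st.2 + 1)
    else st

def get_intr_filter_keys (num_filters : Int) : List (String × Int) :=
  ((PySem.List.pyRange 0 num_filters 1).foldl
    (fun st i => (PySem.List.pyRange 0 num_filters 1).foldl (pvAstep i) st)
    (PySem.Dict.empty, 0)).1.items

-- ===== PORT B =====
def get_intr_filter_keys_alt (num_filters : Int) : List (String × Int) :=
  let keys := (PySem.List.pyRange 0 num_filters 1).flatMap (fun i =>
      (PySem.List.pyRange (i + 1) num_filters 1).map (fun j => pvKey i j))
  (PySem.Dict.ofList ((PySem.List.enumerate keys 0).map (fun p => (p.2, p.1)))).items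

-- ===== PRECONDITION & SPEC =====
def Spec_get_intr_filter_keys (num_filters : Int) (out : List (String × Int)) : Prop := out = get_intr_filter_keys_alt num_filters
instance (num_filters : Int) (out : List (String × Int)) : Decidable (Spec_get_intr_filter_keys num_filters out) := by unfold Spec_get_intr_filter_keys; infer_instance

-- ===== CLAIM (what is proved, stated in full; the proofs are below) =====
def Claim_equal_get_intr_filter_keys : Prop := ∀ (num_filters : Int), Dom_get_intr_filter_keys num_filters → Spec_get_intr_filter_keys num_filters (get_intr_filter_keys num_filters)

-- ===== LEMMAS AND PROOFS =====

-- abstract description of the state: row i of keys, the rows below i, the (key, index) pairs, the loop state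
def pvRow (n i : Int) : List String := (PySem.List.pyRange (i + 1) n 1).map (fun j => pvKey i j)
def pvKeysA (n i : Int) : List String := (PySem.List.pyRange 0 i 1).flatMap (pvRow n)
def pvPairs (ks : List String) (s : Int) : List (String × Int) :=
  (PySem.List.enumerate ks s).map (fun p => (p.2, p.1))
def pvState (K : List String) : PySem.Dict String Int × Int :=
  (PySem.Dict.mk (pvPairs K 0), (K.length : Int))

-- (1) injectivity of the key string on nonnegative indices
lemma digitChar_toNat {n : Nat} (h : n < 10) : (Nat.digitChar n).toNat = 48 + n := by
  interval_cases n <;> decide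

lemma pvDec_aux (n : Nat) : ∀ a : Nat, (Nat.toDigits 10 n).foldl (fun a c => 10 * a + (c.toNat - 48)) a
    = a * 10 ^ (Nat.toDigits 10 n).length + n := by
  induction n using Nat.strong_induction_on with
  | _ n ih =>
    intro a
    by_cases h : n < 10
    · rw [Nat.toDigits_of_lt_base h]
      simp [List.foldl, digitChar_toNat h]
      omega
    · rw [Nat.toDigits_eq_if (by norm_num)]
      simp only [if_neg h]
      rw [List.foldl_append]
      rw [ih (n / 10) (by omega) a]
      simp [digitChar_toNat (Nat.mod_lt _ (by norm_num))]
      ring_nf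
      omega

lemma toDigits_inj {m n : Nat} (h : Nat.toDigits 10 m = Nat.toDigits 10 n) : m = n := by
  have h1 := pvDec_aux m 0
  have h2 := pvDec_aux n 0
  rw [h] at h1; omega

lemma lt_not_mem_toDigits (n : Nat) : '<' ∉ Nat.toDigits 10 n := by
  intro h
  have := Nat.isDigit_of_mem_toDigits (by norm_num) (le_refl 10) h
  exact absurd this (by decide)

lemma pvSep : ∀ (A A' X X' : List Char), '<' ∉ A → '<' ∉ A' →
    A ++ '<' :: X = A' ++ '<' :: X' → A = A' ∧ X = X' := by
  intro A
  induction A with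
  | nil =>
    intro A' X X' _ hA' h
    cases A' with
    | nil => simpa using h
    | cons c t =>
      simp at h
      exact absurd (h.1 ▸ List.mem_cons_self) hA'
  | cons c t ih =>
    intro A' X X' hA hA' h
    cases A' with
    | nil =>
      simp at h
      exact absurd (h.1 ▸ List.mem_cons_self) hA
    | cons c' t' =>
      simp at h
      obtain ⟨rfl, h2⟩ := h
      obtain ⟨h3, h4⟩ := ih t' X X' (fun hm => hA (List.mem_cons_of_mem _ hm)) (fun hm => hA' (List.mem_cons_of_mem _ hm)) h2
      exact ⟨by rw [h3], h4⟩

lemma toChars_nonneg {i : Int} (h : 0 ≤ i) : PySem.Int.toChars i = Nat.toDigits 10 i.toNat := by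
  simp [PySem.Int.toChars, not_lt.2 h]

lemma pvKey_inj {i j i' j' : Int} (hi : 0 ≤ i) (hj : 0 ≤ j) (hi' : 0 ≤ i') (hj' : 0 ≤ j')
    (h : pvKey i j = pvKey i' j') : i = i' ∧ j = j' := by
  unfold pvKey at h
  rw [toChars_nonneg hi, toChars_nonneg hj, toChars_nonneg hi', toChars_nonneg hj'] at h
  have e1 : ("<-->".toList : List Char) = '<' :: "-->".toList := rfl
  simp only [String.ofList_inj, e1, List.append_assoc, List.cons_append,
    List.append_cancel_left_eq] at h
  obtain ⟨hA, hX⟩ := pvSep _ _ _ _ (lt_not_mem_toDigits _) (lt_not_mem_toDigits _) h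
  have hi2 : i = i' := by have := toDigits_inj hA; omega
  simp only [List.append_cancel_left_eq] at hX
  have hj2 : j = j' := by have := toDigits_inj hX; omega
  exact ⟨hi2, hj2⟩

-- (2) pvPairs / pvState bookkeeping
lemma pvPairs_append (a b : List String) (s : Int) :
    pvPairs (a ++ b) s = pvPairs a s ++ pvPairs b (s + a.length) := by
  simp [pvPairs, PySem.List.enumerate_append]

lemma map_fst_pvPairs (K : List String) (s : Int) : (pvPairs K s).map (·.1) = K := by
  simp only [pvPairs, List.map_map]
  exact PySem.List.map_snd_enumerate K s

lemma keys_pvState (K : List String) : (pvState K).1.keys = K := by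
  simp only [pvState, PySem.Dict.keys_mk]
  exact map_fst_pvPairs K 0

lemma contains_pvState (K : List String) (k : String) :
    (pvState K).1.contains k = decide (k ∈ K) := by
  rw [PySem.Dict.contains_eq_decide_mem_keys, keys_pvState]

lemma mem_pvKeysA {n i : Int} {s : String} :
    s ∈ pvKeysA n i ↔ ∃ a b : Int, 0 ≤ a ∧ a < i ∧ a < b ∧ b < n ∧ s = pvKey a b := by
  simp only [pvKeysA, pvRow, List.mem_flatMap, List.mem_map, PySem.List.mem_pyRange_one]
  constructor
  · rintro ⟨a, ⟨ha0, hai⟩, b, ⟨hab, hbn⟩, rfl⟩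
    exact ⟨a, b, ha0, hai, by omega, hbn, rfl⟩
  · rintro ⟨a, b, ha0, hai, hab, hbn, rfl⟩
    exact ⟨a, ⟨ha0, hai⟩, b, ⟨by omega, hbn⟩, rfl⟩

lemma foldl_id {α β : Type} (l : List α) (f : β → α → β) (s : β)
    (h : ∀ x ∈ l, f s x = s) : l.foldl f s = s := by
  induction l with
  | nil => rfl
  | cons x t ih =>
    rw [List.foldl_cons, h x List.mem_cons_self]
    exact ih (fun y hy => h y (List.mem_cons_of_mem _ hy))

-- (3) the inner loop: the first i+1 iterations leave the state unchanged
lemma inner_skip {n i : Int} (_hi : 0 ≤ i) (hin : i < n) :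
    (PySem.List.pyRange 0 (i + 1) 1).foldl (pvAstep i) (pvState (pvKeysA n i))
      = pvState (pvKeysA n i) := by
  apply foldl_id
  intro j hj
  rw [PySem.List.mem_pyRange_one] at hj
  by_cases hij : i = j
  · simp [pvAstep, hij]
  · have hrev : (pvState (pvKeysA n i)).1.contains (pvKey j i) = true := by
      rw [contains_pvState]
      refine decide_eq_true (mem_pvKeysA.mpr ⟨j, i, hj.1, by omega, by omega, hin, rfl⟩)
    simp [pvAstep, hij, hrev]

-- (4) the inner loop from j = i+1 on: each iteration appends a fresh key
lemma pvState_push (K : List String) (x : String) (hx : x ∉ K) :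
    ((pvState K).1.insert x (pvState K).2, (pvState K).2 + 1) = pvState (K ++ [x]) := by
  have hc : (pvState K).1.contains x = false := by
    rw [contains_pvState]; exact decide_eq_false hx
  refine Prod.ext ?_ ?_
  · apply PySem.Dict.ext
    rw [PySem.Dict.items_insert_of_not_contains _ _ hc]
    show pvPairs K 0 ++ [(x, (K.length : Int))] = (PySem.Dict.mk (pvPairs (K ++ [x]) 0)).items
    rw [show (PySem.Dict.mk (pvPairs (K ++ [x]) 0)).items = pvPairs (K ++ [x]) 0 from rfl,
      pvPairs_append]
    simp [pvPairs, PySem.List.enumerate]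
  · show (K.length : Int) + 1 = ((K ++ [x]).length : Int)
    simp

lemma not_mem_state_key {n i j : Int} (hi : 0 ≤ i) (hij : i < j) (_hjn : j ≤ n) :
    pvKey i j ∉ pvKeysA n i ++ (PySem.List.pyRange (i + 1) j 1).map (fun b => pvKey i b) := by
  intro hmem
  rcases List.mem_append.mp hmem with h | h
  · obtain ⟨a, b, ha0, hai, hab, hbn, heq⟩ := mem_pvKeysA.mp h
    have := pvKey_inj ha0 (by omega) hi (by omega) heq.symm
    omega
  · obtain ⟨b, hb, heq⟩ := List.mem_map.mp h
    rw [PySem.List.mem_pyRange_one] at hb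
    have := pvKey_inj hi (by omega) hi (by omega) heq
    omega

lemma not_mem_state_rev {n i j : Int} (hi : 0 ≤ i) (hij : i < j) (_hjn : j ≤ n) :
    pvKey j i ∉ pvKeysA n i ++ (PySem.List.pyRange (i + 1) j 1).map (fun b => pvKey i b) := by
  intro hmem
  rcases List.mem_append.mp hmem with h | h
  · obtain ⟨a, b, ha0, hai, hab, hbn, heq⟩ := mem_pvKeysA.mp h
    have := pvKey_inj ha0 (by omega) (by omega) hi heq.symm
    omega
  · obtain ⟨b, hb, heq⟩ := List.mem_map.mp h
    rw [PySem.List.mem_pyRange_one] at hb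
    have := pvKey_inj hi (by omega) (by omega) hi heq
    omega

lemma inner_ins {n i : Int} (hi : 0 ≤ i) (hin : i < n) :
    ∀ (fuel : Nat) (j : Int), i < j → j ≤ n → fuel = (n - j).toNat →
    (PySem.List.pyRange j n 1).foldl (pvAstep i)
      (pvState (pvKeysA n i ++ (PySem.List.pyRange (i + 1) j 1).map (fun b => pvKey i b)))
      = pvState (pvKeysA n i ++ pvRow n i) := by
  intro fuel
  induction fuel with
  | zero =>
    intro j hij hjn hf
    have : j = n := by omega
    subst this
    rw [PySem.List.pyRange_one_eq_nil (le_refl j)]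
    rfl
  | succ m ih =>
    intro j hij hjn hf
    have hjn' : j < n := by omega
    rw [PySem.List.pyRange_one_cons hjn', List.foldl_cons]
    have hstep : pvAstep i
        (pvState (pvKeysA n i ++ (PySem.List.pyRange (i + 1) j 1).map (fun b => pvKey i b))) j
        = pvState (pvKeysA n i ++ (PySem.List.pyRange (i + 1) (j + 1) 1).map (fun b => pvKey i b)) := by
      have hne : (i == j) = false := by simp; omega
      have h1 : (pvState (pvKeysA n i ++ (PySem.List.pyRange (i + 1) j 1).map (fun b => pvKey i b))).1.contains (pvKey i j) = false := by
        rw [contains_pvState]; exact decide_eq_false (not_mem_state_key hi hij (by omega))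
      have h2 : (pvState (pvKeysA n i ++ (PySem.List.pyRange (i + 1) j 1).map (fun b => pvKey i b))).1.contains (pvKey j i) = false := by
        rw [contains_pvState]; exact decide_eq_false (not_mem_state_rev hi hij (by omega))
      rw [pvAstep, if_neg (by simp; omega)]
      simp only [h1, h2, Bool.not_false, Bool.and_self, if_pos]
      rw [pvState_push _ _ (not_mem_state_key hi hij (by omega))]
      rw [List.append_assoc,
        show ((PySem.List.pyRange (i + 1) j 1).map (fun b => pvKey i b) ++ [pvKey i j]
          : List String) = (PySem.List.pyRange (i + 1) (j + 1) 1).map (fun b => pvKey i b) by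
          rw [PySem.List.pyRange_one_succ_right (by omega : i + 1 ≤ j)]; simp]
    rw [hstep]
    exact ih (j + 1) (by omega) (by omega) (by omega)

lemma keysA_succ {n i : Int} (hi : 0 ≤ i) :
    pvKeysA n (i + 1) = pvKeysA n i ++ pvRow n i := by
  simp [pvKeysA, PySem.List.pyRange_one_succ_right hi]

-- (5) one full inner loop advances the state by one row
lemma inner_full {n i : Int} (hi : 0 ≤ i) (hin : i < n) :
    (PySem.List.pyRange 0 n 1).foldl (pvAstep i) (pvState (pvKeysA n i))
      = pvState (pvKeysA n (i + 1)) := by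
  rw [PySem.List.pyRange_one_append 0 (i + 1) n (by omega) (by omega), List.foldl_append,
    inner_skip hi hin]
  have hins := inner_ins hi hin (n - (i + 1)).toNat (i + 1) (by omega) (by omega) rfl
  rw [PySem.List.pyRange_one_eq_nil (le_refl (i + 1))] at hins
  simp only [List.map_nil, List.append_nil] at hins
  rw [hins, ← keysA_succ hi]

-- (6) the outer loop
lemma outer {n : Int} :
    ∀ (fuel : Nat) (i : Int), 0 ≤ i → i ≤ n → fuel = (n - i).toNat →
    (PySem.List.pyRange i n 1).foldl
      (fun st a => (PySem.List.pyRange 0 n 1).foldl (pvAstep a) st)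
      (pvState (pvKeysA n i))
      = pvState (pvKeysA n n) := by
  intro fuel
  induction fuel with
  | zero =>
    intro i h0 hn hf
    have : i = n := by omega
    subst this
    simp [PySem.List.pyRange_one_eq_nil (le_refl i)]
  | succ m ih =>
    intro i h0 hn hf
    have hin : i < n := by omega
    rw [PySem.List.pyRange_one_cons hin, List.foldl_cons]
    rw [inner_full h0 hin]
    exact ih (i + 1) (by omega) (by omega) (by omega)

-- (7) the keys are pairwise distinct
lemma nodup_pvRow {n i : Int} (hi : 0 ≤ i) : (pvRow n i).Nodup := by
  refine List.Nodup.map_on ?_ (PySem.List.nodup_pyRange_one (i + 1) n)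
  intro b hb b' hb' heq
  rw [PySem.List.mem_pyRange_one] at hb hb'
  exact (pvKey_inj hi (by omega) hi (by omega) heq).2

lemma nodup_pvKeysA {n : Int} : ∀ (fuel : Nat) (i : Int), 0 ≤ i → fuel = i.toNat →
    (pvKeysA n i).Nodup := by
  intro fuel
  induction fuel with
  | zero =>
    intro i h0 hf
    have : i = 0 := by omega
    subst this
    simp [pvKeysA, PySem.List.pyRange_one_eq_nil (le_refl 0)]
  | succ m ih =>
    intro i h0 hf
    have h1 : (0 : Int) ≤ i - 1 := by omega
    have := keysA_succ (n := n) h1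
    rw [show i - 1 + 1 = i by omega] at this
    rw [this]
    refine List.Nodup.append (ih (i - 1) h1 (by omega)) (nodup_pvRow h1) ?_
    intro x hx hx'
    obtain ⟨a, b, ha0, hai, hab, hbn, rfl⟩ := mem_pvKeysA.mp hx
    obtain ⟨b', hb', heq⟩ := List.mem_map.mp hx'
    rw [PySem.List.mem_pyRange_one] at hb'
    have := pvKey_inj h1 (by omega) ha0 (by omega) heq
    omega

-- (8) both ports compute pvPairs (pvKeysA n n) 0
lemma portA_eq (n : Int) : get_intr_filter_keys n = pvPairs (pvKeysA n n) 0 := by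
  unfold get_intr_filter_keys
  by_cases hn : n ≤ 0
  · rw [PySem.List.pyRange_one_eq_nil hn]
    simp [pvKeysA, pvPairs, PySem.List.pyRange_one_eq_nil hn, PySem.Dict.empty]
  · have h0 : (0 : Int) ≤ n := by omega
    have hinit : ((PySem.Dict.empty : PySem.Dict String Int), (0 : Int)) = pvState (pvKeysA n 0) := by
      simp [pvState, pvKeysA, pvPairs, PySem.List.pyRange_one_eq_nil (le_refl 0),
        PySem.Dict.empty]
    rw [hinit, outer n.toNat 0 (le_refl 0) h0 (by omega)]
    rfl

lemma portB_eq (n : Int) : get_intr_filter_keys_alt n = pvPairs (pvKeysA n n) 0 := by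
  have hkeys : ((PySem.List.pyRange 0 n 1).flatMap (fun i =>
      (PySem.List.pyRange (i + 1) n 1).map (fun j => pvKey i j))) = pvKeysA n n := rfl
  have hnd : (pvKeysA n n).Nodup := by
    by_cases hn : n ≤ 0
    · simp [pvKeysA, PySem.List.pyRange_one_eq_nil hn]
    · exact nodup_pvKeysA n.toNat n (by omega) rfl
  simp only [get_intr_filter_keys_alt]
  rw [hkeys]
  show (PySem.Dict.ofList (pvPairs (pvKeysA n n) 0)).items = pvPairs (pvKeysA n n) 0
  rw [PySem.Dict.ofList, PySem.Dict.update]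
  have h := PySem.Dict.items_foldl_insert_fresh (l := pvPairs (pvKeysA n n) 0)
    (k := fun p : String × Int => p.1) (v := fun p : String × Int => p.2)
    (d := PySem.Dict.empty)
    (fun a _ => PySem.Dict.contains_empty _)
    (by rw [map_fst_pvPairs]; exact hnd)
  exact h.trans (by simp [PySem.Dict.empty])

-- ===== VERDICT (by name: the statement is the Claim_ definition above) =====
theorem get_intr_filter_keys_spec : Claim_equal_get_intr_filter_keys := by
  intro n _
  unfold Spec_get_intr_filter_keys
  rw [portA_eq, portB_eq]
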